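-- pv_equiv track=rewrite | github.com/PolyGon-13/Introduction_to_Robot_Engineering_Design | project2/test/fgm_avoid_backup.py | find_free_gaps
-- ===== SOURCE A (Python) =====
-- def find_free_gaps(free_mask):
--     gaps = []
--     start = None
--     for idx, free in enumerate(free_mask):
--         if free and start is None:
--             start = idx
--         elif not free and start is not None:
--             gaps.append((start, idx))
--             start = None
--     if start is not None:
--         gaps.append((start, len(free_mask)))
--     return gaps
-- ===== SOURCE B (Python) =====
-- def find_free_gaps(free_mask):
--     gaps = []
--     i, n = 0, len(free_mask)
--     while i < n:
--         if free_mask[i]: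
--             j = i + 1
--             while j < n and free_mask[j]:
--                 j += 1
--             gaps.append((i, j))
--             i = j
--         else:
--             i += 1
--     return gaps
-- ===== Notes on version B (the rewrite author's own statement) =====
-- stated objective: alternative
-- what changed: Replaces the element-by-element scan with a start=None sentinel and a final flush by a run-skipping two-index scan: at each free cell it advances a second index past the whole run and emits the gap immediately, so no open-run state or post-loop close is needed.
import Mathlib
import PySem

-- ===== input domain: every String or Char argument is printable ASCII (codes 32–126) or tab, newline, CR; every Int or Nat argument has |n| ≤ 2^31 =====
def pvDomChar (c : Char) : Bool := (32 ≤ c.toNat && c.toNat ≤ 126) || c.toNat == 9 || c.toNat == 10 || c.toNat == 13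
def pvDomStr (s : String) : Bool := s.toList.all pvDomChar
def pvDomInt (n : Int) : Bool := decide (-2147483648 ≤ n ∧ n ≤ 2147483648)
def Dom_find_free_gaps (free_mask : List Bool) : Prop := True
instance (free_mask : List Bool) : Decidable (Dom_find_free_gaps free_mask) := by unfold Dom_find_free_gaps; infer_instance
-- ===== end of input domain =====

-- B is an alternative run-skipping scan (same O(n) cost): it emits each gap as soon as the
-- run of free cells is skipped, instead of A's start=None sentinel state with a final flush.

-- ===== PORT A =====
-- the for-loop over enumerate(free_mask) with state (gaps, start), transcribed as structural recursion
def find_free_gaps_loopA : List Bool → Int → List (Int × Int) × Option Int → List (Int × Int) × Option Int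
  | [], _, st => st
  | free :: rest, idx, (gaps, start) =>
    find_free_gaps_loopA rest (idx + 1)
      (match free, start with
       | true, none => (gaps, some idx)
       | false, some s => (gaps ++ [(s, idx)], none)
       | _, _ => (gaps, start))

def find_free_gaps (free_mask : List Bool) : List (Int × Int) :=
  let st := find_free_gaps_loopA free_mask 0 ([], none)
  match st.2 with
  | some s => st.1 ++ [(s, (free_mask.length : Int))]
  | none => st.1

-- ===== PORT B =====
-- inner while: count of the leading run of free cells, and the list after it
def find_free_gaps_scan : List Bool → Nat × List Bool
  | [] => (0, [])
  | b :: rest => if b then ((find_free_gaps_scan rest).1 + 1, (find_free_gaps_scan rest).2) else (0, b :: rest)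

theorem find_free_gaps_scan_len_le : ∀ (l : List Bool), (find_free_gaps_scan l).2.length ≤ l.length := by
  intro l
  induction l with
  | nil => simp [find_free_gaps_scan]
  | cons b rest ih =>
    by_cases hb : b = true <;> simp [find_free_gaps_scan, hb] <;> omega

-- outer while over i: recursion on the remaining suffix, carrying the position i
def find_free_gaps_goB : List Bool → Int → List (Int × Int)
  | [], _ => []
  | b :: rest, i =>
    if b then
      (i, i + 1 + ((find_free_gaps_scan rest).1 : Int)) ::
        find_free_gaps_goB (find_free_gaps_scan rest).2 (i + 1 + ((find_free_gaps_scan rest).1 : Int))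
    else
      find_free_gaps_goB rest (i + 1)
termination_by l _ => l.length
decreasing_by
  · exact Nat.lt_succ_of_le (find_free_gaps_scan_len_le rest)
  · simp

def find_free_gaps_alt (free_mask : List Bool) : List (Int × Int) :=
  find_free_gaps_goB free_mask 0

-- ===== PRECONDITION & SPEC =====
def Spec_find_free_gaps (free_mask : List Bool) (out : List (Int × Int)) : Prop := out = find_free_gaps_alt free_mask
instance (free_mask : List Bool) (out : List (Int × Int)) : Decidable (Spec_find_free_gaps free_mask out) := by unfold Spec_find_free_gaps; infer_instance

-- ===== CLAIM (what is proved, stated in full; the proofs are below) =====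
def Claim_equal_find_free_gaps : Prop := ∀ (free_mask : List Bool), Dom_find_free_gaps free_mask → Spec_find_free_gaps free_mask (find_free_gaps free_mask)

-- ===== LEMMAS AND PROOFS =====

-- A's post-loop flush, parameterised by the end index e
def find_free_gaps_finish (st : List (Int × Int) × Option Int) (e : Int) : List (Int × Int) :=
  match st.2 with
  | some s => st.1 ++ [(s, e)]
  | none => st.1

-- what B produces from position i on the suffix l, given A's open-run state
def find_free_gaps_rhs (l : List Bool) (i : Int) : Option Int → List (Int × Int)
  | none => find_free_gaps_goB l i
  | some s => (s, i + ((find_free_gaps_scan l).1 : Int)) ::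
      find_free_gaps_goB (find_free_gaps_scan l).2 (i + ((find_free_gaps_scan l).1 : Int))

theorem find_free_gaps_go_eq :
    ∀ (l : List Bool) (i : Int) (acc : List (Int × Int)) (st : Option Int),
      find_free_gaps_finish (find_free_gaps_loopA l i (acc, st)) (i + l.length) =
        acc ++ find_free_gaps_rhs l i st := by
  intro l
  induction l with
  | nil =>
    intro i acc st
    cases st <;> simp [find_free_gaps_loopA, find_free_gaps_finish, find_free_gaps_rhs,
      find_free_gaps_scan, find_free_gaps_goB]
  | cons b rest ih =>
    intro i acc st
    have harith : i + 1 + ((rest.length : Nat) : Int) = i + (((rest.length + 1 : Nat)) : Int) := by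
      push_cast; ring
    cases st with
    | none =>
      cases b with
      | true =>
        have := ih (i + 1) acc (some i)
        simp only [find_free_gaps_loopA, List.length_cons] at *
        rw [← harith, this]
        simp [find_free_gaps_rhs, find_free_gaps_goB]
      | false =>
        have := ih (i + 1) acc none
        simp only [find_free_gaps_loopA, List.length_cons] at *
        rw [← harith, this]
        simp [find_free_gaps_rhs, find_free_gaps_goB]
    | some s =>
      cases b with
      | true =>
        have := ih (i + 1) acc (some s)
        simp only [find_free_gaps_loopA, List.length_cons] at *
        rw [← harith, this]
        simp [find_free_gaps_rhs, find_free_gaps_scan]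
        constructor <;> [push_cast; skip] <;> [ring; skip]
        congr 1
        ring
      | false =>
        have := ih (i + 1) (acc ++ [(s, i)]) none
        simp only [find_free_gaps_loopA, List.length_cons] at *
        rw [← harith, this]
        simp [find_free_gaps_rhs, find_free_gaps_goB, find_free_gaps_scan]

-- ===== VERDICT (by name: the statement is the Claim_ definition above) =====
theorem find_free_gaps_spec : Claim_equal_find_free_gaps := by
  intro fm _
  unfold Spec_find_free_gaps find_free_gaps find_free_gaps_alt
  have h := find_free_gaps_go_eq fm 0 [] none
  simp only [zero_add, find_free_gaps_rhs, List.nil_append] at h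
  rw [← h]
  rfl
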